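-- pv_equiv track=rewrite | github.com/HanSeongDeok/before-dinner-algorithm | programmers/han/Level 2-3/31.롤케이크 자르기.py | solution
-- ===== SOURCE A (Python) =====
-- from collections import Counter
-- from collections import Counter
--
-- def solution(topping):
--     topping_cntr = Counter(topping)
--     compare_set = set()
--     result = 0
--     for t in topping:
--         compare_set.add(t)
--         topping_cntr[t] -= 1
--         if topping_cntr[t] == 0:
--             del topping_cntr[t]
--         if len(compare_set) == len(topping_cntr):
--             result += 1
--     return result
-- ===== SOURCE B (Python) =====
-- def solution(topping):
--     # Suffix-distinct table + one left-to-right pass (no Counter maintenance).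
--     seen = set()
--     right_distinct = [0]
--     for t in reversed(topping):
--         seen.add(t)
--         right_distinct.append(len(seen))
--     right_distinct.reverse()
--     left = set()
--     result = 0
--     for t, r in zip(topping, right_distinct[1:]):
--         left.add(t)
--         if len(left) == r:
--             result += 1
--     return result
-- ===== Notes on version B (the rewrite author's own statement) =====
-- stated objective: faster
-- what changed: Replaces the Counter that is decremented/deleted at every step with a precomputed suffix-distinct table (one reverse pass with a plain set) followed by a single left-to-right pass comparing set sizes.
import Mathlib
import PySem

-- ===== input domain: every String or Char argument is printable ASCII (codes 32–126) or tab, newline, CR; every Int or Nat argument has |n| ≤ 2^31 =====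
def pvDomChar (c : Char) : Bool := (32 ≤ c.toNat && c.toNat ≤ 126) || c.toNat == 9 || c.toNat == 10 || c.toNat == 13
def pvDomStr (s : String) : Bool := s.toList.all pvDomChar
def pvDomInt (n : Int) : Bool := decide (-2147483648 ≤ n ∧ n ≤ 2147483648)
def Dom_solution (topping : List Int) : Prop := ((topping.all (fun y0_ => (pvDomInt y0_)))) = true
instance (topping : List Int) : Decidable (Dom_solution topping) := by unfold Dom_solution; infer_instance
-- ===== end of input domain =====

-- B replaces A's per-step Counter decrement/delete bookkeeping by a precomputed
-- suffix-distinct table (reverse pass with a set) and one left-to-right pass.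

-- ===== PORT A =====
-- loop body of A: add t to the left set, decrement (and maybe delete) t in the
-- counter, bump the result when the two sizes agree
def stepA (st : PySem.Dict Int Int × PySem.Set Int × Int) (t : Int) :
    PySem.Dict Int Int × PySem.Set Int × Int :=
  let cs := PySem.Set.add st.2.1 t
  let d1 := st.1.insert t (st.1.getD t 0 - 1)
  let d2 := if d1.getD t 0 == 0 then d1.erase t else d1
  (d2, cs, if PySem.Set.len cs == (d2.size : Int) then st.2.2 + 1 else st.2.2)

def solution (topping : List Int) : Int :=
  (topping.foldl stepA (PySem.Dict.counter topping, PySem.Set.empty, 0)).2.2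

-- ===== PORT B =====
-- reverse pass: grow the seen-set, record its size
def stepR (p : PySem.Set Int × List Int) (t : Int) : PySem.Set Int × List Int :=
  let s := PySem.Set.add p.1 t
  (s, p.2 ++ [PySem.Set.len s])

-- forward pass: grow the left set, compare with the tabulated suffix count
def stepB (q : PySem.Set Int × Int) (tr : Int × Int) : PySem.Set Int × Int :=
  let s := PySem.Set.add q.1 tr.1
  (s, if PySem.Set.len s == tr.2 then q.2 + 1 else q.2)

def solution_alt (topping : List Int) : Int :=
  let rd := (topping.reverse.foldl stepR (PySem.Set.empty, [(0 : Int)])).2.reverse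
  ((topping.zip (rd.drop 1)).foldl stepB (PySem.Set.empty, 0)).2

-- ===== PRECONDITION & SPEC =====
def Spec_solution (topping : List Int) (out : Int) : Prop := out = solution_alt topping
instance (topping : List Int) (out : Int) : Decidable (Spec_solution topping out) := by unfold Spec_solution; infer_instance

-- ===== CLAIM (what is proved, stated in full; the proofs are below) =====
def Claim_equal_solution : Prop := ∀ (topping : List Int), Dom_solution topping → Spec_solution topping (solution topping)

-- ===== LEMMAS AND PROOFS =====

-- number of distinct elements of a list, as a Python int
def distinctI (xs : List Int) : Int := PySem.Set.len (PySem.Set.ofList xs)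

-- reference count: walk the list keeping the left set, compare against the
-- distinct count of the remaining suffix
def specCount : PySem.Set Int → List Int → Int
  | _, [] => 0
  | cs, t :: rest =>
      (if PySem.Set.len (PySem.Set.add cs t) == distinctI rest then 1 else 0)
        + specCount (PySem.Set.add cs t) rest

-- the suffix-distinct table B computes: entry i is distinctI of the suffix from i
def rdSpec : List Int → List Int
  | [] => [0]
  | t :: rest => distinctI (t :: rest) :: rdSpec rest

theorem len_eq_of_mem_iff (s1 s2 : List Int) (h1 : s1.Nodup) (h2 : s2.Nodup)
    (h : ∀ x, x ∈ s1 ↔ x ∈ s2) : s1.length = s2.length :=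
  ((List.perm_ext_iff_of_nodup h1 h2).mpr h).length_eq

theorem get?_erase (d : PySem.Dict Int Int) (k x : Int) :
    (d.erase k).get? x = if x = k then none else d.get? x := by
  obtain ⟨items⟩ := d
  induction items with
  | nil => simp [PySem.Dict.erase, PySem.Dict.get?]
  | cons p rest ih =>
    by_cases hpk : p.1 = k
    · have hskip : (PySem.Dict.mk (p :: rest)).erase k = (PySem.Dict.mk rest).erase k := by
        simp [PySem.Dict.erase, hpk]
      rw [hskip, ih]
      by_cases hxk : x = k
      · simp [hxk]
      · rw [if_neg hxk, if_neg hxk, PySem.Dict.get?_mk_cons]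
        have : (p.1 == x) = false := by
          simp only [beq_eq_false_iff_ne]; rw [hpk]; exact fun h => hxk h.symm
        simp [this]
    · have hkeep : (PySem.Dict.mk (p :: rest)).erase k
          = PySem.Dict.mk (p :: ((PySem.Dict.mk rest).erase k).items) := by
        simp [PySem.Dict.erase, hpk]
      rw [hkeep]
      by_cases hpx : p.1 = x
      · have hxk : ¬ x = k := by rw [← hpx]; exact hpk
        rw [if_neg hxk]
        have h1 : (PySem.Dict.mk (p :: ((PySem.Dict.mk rest).erase k).items)).get? x
            = some p.2 := by
          rw [show (p : Int × Int) = (p.1, p.2) from rfl, PySem.Dict.get?_mk_cons]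
          simp [hpx]
        have h2 : (PySem.Dict.mk (p :: rest)).get? x = some p.2 := by
          rw [show (p : Int × Int) = (p.1, p.2) from rfl, PySem.Dict.get?_mk_cons]
          simp [hpx]
        rw [h1, h2]
      · have hb : (p.1 == x) = false := by simpa using hpx
        rw [show (p : Int × Int) = (p.1, p.2) from rfl, PySem.Dict.get?_mk_cons]
        simp only [hb, Bool.false_eq_true, if_false]
        rw [ih, PySem.Dict.get?_mk_cons]
        simp [hb]

theorem getD_erase (d : PySem.Dict Int Int) (k x : Int) :
    (d.erase k).getD x 0 = if x = k then 0 else d.getD x 0 := by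
  rw [PySem.Dict.getD_eq_get?_getD, get?_erase]
  by_cases hxk : x = k
  · simp [hxk]
  · simp [hxk, PySem.Dict.getD_eq_get?_getD]

theorem mem_keys_erase (d : PySem.Dict Int Int) (k x : Int) :
    x ∈ (d.erase k).keys ↔ x ∈ d.keys ∧ x ≠ k := by
  simp only [PySem.Dict.erase, PySem.Dict.keys, List.mem_map, List.mem_filter]
  constructor
  · rintro ⟨p, ⟨hp, hne⟩, rfl⟩
    exact ⟨⟨p, hp, rfl⟩, by simpa using hne⟩
  · rintro ⟨⟨p, hp, rfl⟩, hne⟩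
    exact ⟨p, ⟨hp, by simpa using hne⟩, rfl⟩

theorem nodup_keys_erase (d : PySem.Dict Int Int) (k : Int) (h : d.keys.Nodup) :
    (d.erase k).keys.Nodup :=
  ((List.filter_sublist (l := d.items)).map Prod.fst).nodup h

theorem size_eq_keys_length (d : PySem.Dict Int Int) : d.size = d.keys.length := by
  simp [PySem.Dict.size, PySem.Dict.keys]

-- A's loop computes specCount, given the dict holds the counts of the suffix
theorem foldA_spec (s : List Int) : ∀ (d : PySem.Dict Int Int) (cs : PySem.Set Int) (r : Int),
    d.keys.Nodup → cs.Nodup →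
    (∀ x, d.getD x 0 = (s.count x : Int)) → (∀ x, x ∈ d.keys ↔ x ∈ s) →
    (s.foldl stepA (d, cs, r)).2.2 = r + specCount cs s := by
  induction s with
  | nil => intro d cs r _ _ _ _; simp [specCount]
  | cons t rest ih =>
    intro d cs r hnd hncs hcount hmem
    simp only [List.foldl_cons, stepA]
    have hncs' : (PySem.Set.add cs t).Nodup := PySem.Set.nodup_add _ _ hncs
    have hd1t : (d.insert t (d.getD t 0 - 1)).getD t 0 = (rest.count t : Int) := by
      rw [PySem.Dict.getD_insert_self, hcount t, List.count_cons_self]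
      push_cast; ring
    have hd1x : ∀ x, x ≠ t → (d.insert t (d.getD t 0 - 1)).getD x 0 = (rest.count x : Int) := by
      intro x hx
      rw [PySem.Dict.getD_insert_of_ne (hne := hx), hcount x, List.count_cons_of_ne (Ne.symm hx)]
    have hkeys1 : ∀ x, x ∈ (d.insert t (d.getD t 0 - 1)).keys ↔ x ∈ t :: rest := by
      intro x
      rw [PySem.Dict.mem_keys_insert, List.mem_cons, hmem x, List.mem_cons]
      tauto
    have hnd1 : (d.insert t (d.getD t 0 - 1)).keys.Nodup := PySem.Dict.nodup_keys_insert _ _ _ hnd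
    by_cases hzero : (rest.count t : Int) = 0
    · -- t does not occur in rest: the key is deleted
      have htnotin : t ∉ rest := by
        intro h; have hp := List.count_pos_iff.mpr h; omega
      have hcond : ((d.insert t (d.getD t 0 - 1)).getD t 0 == (0:Int)) = true := by
        rw [hd1t]; simpa using hzero
      simp only [hcond, if_true]
      have hnd2 : ((d.insert t (d.getD t 0 - 1)).erase t).keys.Nodup := nodup_keys_erase _ _ hnd1
      have hcount2 : ∀ x, ((d.insert t (d.getD t 0 - 1)).erase t).getD x 0 = (rest.count x : Int) := by
        intro x
        rw [getD_erase]
        split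
        · next hx =>
            subst hx
            have := List.count_eq_zero_of_not_mem htnotin
            omega
        · next hx => exact hd1x x hx
      have hmem2 : ∀ x, x ∈ ((d.insert t (d.getD t 0 - 1)).erase t).keys ↔ x ∈ rest := by
        intro x
        rw [mem_keys_erase, hkeys1, List.mem_cons]
        constructor
        · rintro ⟨rfl | hx, hne⟩
          · exact absurd rfl hne
          · exact hx
        · intro hx
          exact ⟨Or.inr hx, fun h => htnotin (h ▸ hx)⟩
      have hsz : ((((d.insert t (d.getD t 0 - 1)).erase t).size : Nat) : Int) = distinctI rest := by
        rw [size_eq_keys_length, distinctI, PySem.Set.len]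
        have := len_eq_of_mem_iff _ (PySem.Set.ofList rest) hnd2 (PySem.Set.nodup_ofList _)
          (fun x => (hmem2 x).trans (PySem.Set.mem_ofList _ _).symm)
        exact_mod_cast this
      rw [ih _ _ _ hnd2 hncs' hcount2 hmem2]
      simp only [specCount, hsz]
      cases hb : (PySem.Set.len (PySem.Set.add cs t) == distinctI rest)
      · simp
      · simp
        ring
    · -- t still occurs in rest: the key stays
      have htin : t ∈ rest := by
        by_contra h
        exact hzero (by simp [List.count_eq_zero_of_not_mem h])
      have hcond : ((d.insert t (d.getD t 0 - 1)).getD t 0 == (0:Int)) = false := by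
        rw [hd1t]; simpa using hzero
      simp only [hcond, Bool.false_eq_true, if_false]
      have hcount2 : ∀ x, (d.insert t (d.getD t 0 - 1)).getD x 0 = (rest.count x : Int) := by
        intro x
        by_cases hx : x = t
        · subst hx; exact hd1t
        · exact hd1x x hx
      have hmem2 : ∀ x, x ∈ (d.insert t (d.getD t 0 - 1)).keys ↔ x ∈ rest := by
        intro x
        rw [hkeys1, List.mem_cons]
        constructor
        · rintro (rfl | hx)
          · exact htin
          · exact hx
        · exact Or.inr
      have hsz : (((d.insert t (d.getD t 0 - 1)).size : Nat) : Int) = distinctI rest := by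
        rw [size_eq_keys_length, distinctI, PySem.Set.len]
        have := len_eq_of_mem_iff _ (PySem.Set.ofList rest) hnd1 (PySem.Set.nodup_ofList _)
          (fun x => (hmem2 x).trans (PySem.Set.mem_ofList _ _).symm)
        exact_mod_cast this
      rw [ih _ _ _ hnd1 hncs' hcount2 hmem2]
      simp only [specCount, hsz]
      cases hb : (PySem.Set.len (PySem.Set.add cs t) == distinctI rest)
      · simp
      · simp
        ring

-- B's reverse pass computes rdSpec (reversed); the seen-set holds the elements
theorem foldR_spec (xs : List Int) :
    (xs.reverse.foldl stepR (PySem.Set.empty, [(0 : Int)])).1.Nodup ∧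
    (∀ x, x ∈ (xs.reverse.foldl stepR (PySem.Set.empty, [(0 : Int)])).1 ↔ x ∈ xs) ∧
    (xs.reverse.foldl stepR (PySem.Set.empty, [(0 : Int)])).2.reverse = rdSpec xs := by
  induction xs with
  | nil => exact ⟨List.nodup_nil, by simp [PySem.Set.empty], rfl⟩
  | cons t rest ih =>
    obtain ⟨hnd, hmem, hrd⟩ := ih
    simp only [List.reverse_cons, List.foldl_append, List.foldl_cons, List.foldl_nil, stepR]
    have hlen : PySem.Set.len
        (PySem.Set.add (rest.reverse.foldl stepR (PySem.Set.empty, [(0 : Int)])).1 t)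
          = distinctI (t :: rest) := by
      rw [distinctI, PySem.Set.len, PySem.Set.len]
      have := len_eq_of_mem_iff _ (PySem.Set.ofList (t :: rest)) (PySem.Set.nodup_add _ _ hnd)
        (PySem.Set.nodup_ofList _) (fun x => by
          rw [PySem.Set.mem_add, hmem x, PySem.Set.mem_ofList, List.mem_cons]
          tauto)
      exact_mod_cast this
    refine ⟨PySem.Set.nodup_add _ _ hnd, ?_, ?_⟩
    · intro x
      rw [PySem.Set.mem_add, hmem x, List.mem_cons]
      tauto
    · rw [List.reverse_append]
      simp only [List.reverse_cons, List.reverse_nil, List.nil_append, List.cons_append,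
        hrd, rdSpec, hlen]

theorem rdSpec_head (s : List Int) : rdSpec s = distinctI s :: (rdSpec s).drop 1 := by
  cases s <;> simp [rdSpec, distinctI, PySem.Set.len]

-- B's forward pass computes specCount
theorem foldB_spec (s : List Int) : ∀ (cs : PySem.Set Int) (r : Int),
    ((s.zip ((rdSpec s).drop 1)).foldl stepB (cs, r)).2 = r + specCount cs s := by
  induction s with
  | nil => intro cs r; simp [specCount]
  | cons t rest ih =>
    intro cs r
    have h1 : (rdSpec (t :: rest)).drop 1 = rdSpec rest := by simp [rdSpec]
    rw [h1, rdSpec_head rest]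
    simp only [List.zip_cons_cons, List.foldl_cons, stepB]
    rw [ih]
    simp only [specCount]
    cases hb : (PySem.Set.len (PySem.Set.add cs t) == distinctI rest)
    · simp
    · simp
      ring

-- ===== VERDICT (by name: the statement is the Claim_ definition above) =====
theorem solution_spec : Claim_equal_solution := by
  intro topping _
  unfold Spec_solution solution solution_alt
  obtain ⟨-, -, hrd⟩ := foldR_spec topping
  rw [foldA_spec topping (PySem.Dict.counter topping) PySem.Set.empty 0
        (PySem.Dict.nodup_keys_counter topping) List.nodup_nil
        (fun x => PySem.Dict.getD_counter topping x)
        (fun x => by rw [PySem.Dict.keys_counter, PySem.Set.mem_ofList]), hrd,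
      foldB_spec topping PySem.Set.empty 0]
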